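-- pv_equiv track=rewrite | github.com/danielrelman4-sudo/deep-reader | tools/chat.py | _parse_routing
-- ===== SOURCE A (Python) =====
-- def _parse_routing(response: str) -> dict[str, list[str]]:
--     result = {"sources": [], "threads": [], "concepts": []}
--     current = None
--     for line in response.split("\n"):
--         line = line.strip()
--         if line.startswith("SOURCES:"):
--             current = "sources"
--         elif line.startswith("THREADS:"):
--             current = "threads"
--         elif line.startswith("CONCEPTS:"):
--             current = "concepts"
--         elif line.startswith("- ") and current:
--             item = line[2:].strip()
--             if item.upper() != "NONE":
--                 result[current].append(item)
--     return result
-- ===== SOURCE B (Python) =====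
-- _HEADERS = (("SOURCES:", "sources"), ("THREADS:", "threads"), ("CONCEPTS:", "concepts"))
--
--
-- def _key_of(line):
--     for prefix, key in _HEADERS:
--         if line.startswith(prefix):
--             return key
--     return None
--
--
-- def _items(block):
--     out = []
--     for line in block:
--         if line.startswith("- "):
--             item = line[2:].strip()
--             if item.upper() != "NONE":
--                 out.append(item)
--     return out
--
--
-- def _parse_routing(response: str) -> dict[str, list[str]]:
--     # Phase 1: partition the stripped lines into (section-key, block-of-lines)
--     # sections; lines before the first header belong to no section.
--     sections = []
--     for line in response.split("\n"):
--         line = line.strip()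
--         key = _key_of(line)
--         if key is not None:
--             sections.append((key, []))
--         elif sections:
--             sections[-1][1].append(line)
--     # Phase 2: parse each block's "- " items into its section's list.
--     result = {"sources": [], "threads": [], "concepts": []}
--     for key, block in sections:
--         result[key].extend(_items(block))
--     return result
-- ===== Notes on version B (the rewrite author's own statement) =====
-- stated objective: alternative
-- what changed: A's single stateful line scan (a 'current' pointer appending items straight into the dict) is replaced by a two-phase decomposition: first partition the stripped lines into an explicit list of (header-key, block-of-lines) sections, then parse each section's block of item lines into its section's list.
import Mathlib
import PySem

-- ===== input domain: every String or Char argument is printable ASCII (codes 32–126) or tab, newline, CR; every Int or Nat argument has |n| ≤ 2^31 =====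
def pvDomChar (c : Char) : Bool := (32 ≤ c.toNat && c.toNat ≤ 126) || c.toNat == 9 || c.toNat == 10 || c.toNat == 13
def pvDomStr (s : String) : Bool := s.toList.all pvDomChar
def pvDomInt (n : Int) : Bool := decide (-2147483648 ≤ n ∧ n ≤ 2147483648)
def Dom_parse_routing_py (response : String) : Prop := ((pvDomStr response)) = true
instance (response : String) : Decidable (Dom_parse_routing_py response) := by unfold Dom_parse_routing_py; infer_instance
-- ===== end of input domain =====

-- B re-decomposes A's single stateful scan into partition-into-sections then parse-each-block (objective: alternative decomposition, same cost).

-- ===== PORT A =====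
-- the loop body of A: state = (current, result-dict); the line is stripped first
def prStepA (st : Option String × PySem.Dict String (List String)) (line0 : List Char) :
    Option String × PySem.Dict String (List String) :=
  let line := PySem.Chars.strip line0
  if PySem.Chars.startswith line "SOURCES:".toList then (some "sources", st.2)
  else if PySem.Chars.startswith line "THREADS:".toList then (some "threads", st.2)
  else if PySem.Chars.startswith line "CONCEPTS:".toList then (some "concepts", st.2)
  else if PySem.Chars.startswith line "- ".toList then
    match st.1 with
    | some cur =>
        let item := PySem.Chars.strip (PySem.List.slice line (some 2) none)
        if PySem.Chars.upper item ≠ "NONE".toList then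
          (st.1, st.2.modify cur [] (fun v => v ++ [String.ofList item]))
        else st
    | none => st
  else st

def parse_routing_py (response : String) : List (String × List String) :=
  let result : PySem.Dict String (List String) :=
    PySem.Dict.ofList [("sources", []), ("threads", []), ("concepts", [])]
  (((PySem.Chars.splitOn response.toList "\n".toList).foldl prStepA (none, result)).2).items

-- ===== PORT B =====
-- B's _key_of helper
def prKeyOf (line : List Char) : Option String :=
  if PySem.Chars.startswith line "SOURCES:".toList then some "sources"
  else if PySem.Chars.startswith line "THREADS:".toList then some "threads"
  else if PySem.Chars.startswith line "CONCEPTS:".toList then some "concepts"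
  else none

-- the loop body of B's _items helper
def prItemStep (out : List String) (line : List Char) : List String :=
  if PySem.Chars.startswith line "- ".toList then
    let item := PySem.Chars.strip (PySem.List.slice line (some 2) none)
    if PySem.Chars.upper item ≠ "NONE".toList then out ++ [String.ofList item] else out
  else out

-- B's _items: extract the "- " items of one block
def prItems (block : List (List Char)) : List String :=
  block.foldl prItemStep []

-- B's phase-1 loop body: open a new (key, []) section, or append the stripped line to the last block
def prStepS (secs : List (String × List (List Char))) (line0 : List Char) :
    List (String × List (List Char)) :=
  let line := PySem.Chars.strip line0
  match prKeyOf line with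
  | some k => secs ++ [(k, [])]
  | none =>
      match secs.getLast? with
      | some last => secs.dropLast ++ [(last.1, last.2 ++ [line])]
      | none => secs

def parse_routing_py_alt (response : String) : List (String × List String) :=
  let sections := (PySem.Chars.splitOn response.toList "\n".toList).foldl prStepS []
  let result : PySem.Dict String (List String) :=
    PySem.Dict.ofList [("sources", []), ("threads", []), ("concepts", [])]
  (sections.foldl (fun d p => d.modify p.1 [] (fun v => v ++ prItems p.2)) result).items

-- ===== PRECONDITION & SPEC =====
def Spec_parse_routing_py (response : String) (out : List (String × List String)) : Prop := out = parse_routing_py_alt response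
instance (response : String) (out : List (String × List String)) : Decidable (Spec_parse_routing_py response out) := by unfold Spec_parse_routing_py; infer_instance

-- ===== CLAIM (what is proved, stated in full; the proofs are below) =====
def Claim_equal_parse_routing_py : Prop := ∀ (response : String), Dom_parse_routing_py response → Spec_parse_routing_py response (parse_routing_py response)

-- ===== LEMMAS AND PROOFS =====
-- B's phase 2, seen from an arbitrary starting dict
def prApply (d : PySem.Dict String (List String)) (secs : List (String × List (List Char))) :
    PySem.Dict String (List String) :=
  secs.foldl (fun d p => d.modify p.1 [] (fun v => v ++ prItems p.2)) d

-- the key of the last (open) section = A's `current`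
def prCur (secs : List (String × List (List Char))) : Option String :=
  secs.getLast?.map (·.1)

theorem prApply_concat (d : PySem.Dict String (List String)) (ss : List (String × List (List Char)))
    (p : String × List (List Char)) :
    prApply d (ss ++ [p]) = (prApply d ss).modify p.1 [] (fun v => v ++ prItems p.2) := by
  simp [prApply, List.foldl_append]

theorem prContains_prApply (d : PySem.Dict String (List String)) (secs : List (String × List (List Char)))
    (k : String) (h : d.contains k = true) : (prApply d secs).contains k = true := by
  induction secs generalizing d with
  | nil => exact h
  | cons p ss ih =>
      show (prApply (d.modify p.1 [] _) ss).contains k = true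
      exact ih _ (by rw [PySem.Dict.contains_modify, h, Bool.or_true])

theorem prNodup_prApply (d : PySem.Dict String (List String)) (secs : List (String × List (List Char)))
    (h : d.keys.Nodup) : (prApply d secs).keys.Nodup := by
  induction secs generalizing d with
  | nil => exact h
  | cons p ss ih =>
      show (prApply (d.modify p.1 [] _) ss).keys.Nodup
      exact ih _ (PySem.Dict.nodup_keys_insert d p.1 _ h)

theorem prModify_modify (d : PySem.Dict String (List String)) (k : String)
    (f g : List String → List String) :
    (d.modify k [] f).modify k [] g = d.modify k [] (fun v => g (f v)) := by
  show (d.insert k (f (d.getD k []))).insert k (g ((d.insert k (f (d.getD k []))).getD k []))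
      = d.insert k (g (f (d.getD k [])))
  rw [PySem.Dict.getD_insert_self, PySem.Dict.insert_insert_self]

theorem prModify_id (d : PySem.Dict String (List String)) (k : String)
    (hnd : d.keys.Nodup) (hc : d.contains k = true) : d.modify k [] (fun v => v) = d := by
  show d.insert k (d.getD k []) = d
  rw [PySem.Dict.insert, if_pos hc]
  apply PySem.Dict.ext
  show d.items.map _ = d.items
  conv_rhs => rw [← List.map_id d.items]
  apply List.map_congr_left
  intro p hp
  by_cases hk : (p.1 == k) = true
  · have hk' : p.1 = k := by simpa using hk
    have hv : d.getD p.1 [] = p.2 := PySem.Dict.getD_of_mem_items d (by exact hp) hnd []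
    simp [← hk', hv]
  · simp [hk]

theorem prItems_from (init : List String) (b : List (List Char)) :
    b.foldl prItemStep init = init ++ prItems b := by
  induction b generalizing init with
  | nil => simp [prItems]
  | cons l b ih =>
      have hstep : ∀ acc, prItemStep acc l = acc ++ prItemStep [] l := by
        intro acc
        by_cases hA : PySem.Chars.startswith l ['-', ' '] = true <;>
          by_cases hB : PySem.Chars.upper (PySem.Chars.strip (PySem.List.slice l (some 2) none)) = ['N', 'O', 'N', 'E'] <;>
          simp [prItemStep, hA, hB]
      rw [List.foldl_cons, ih (prItemStep init l), hstep init, List.append_assoc]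
      conv_rhs => rw [prItems, List.foldl_cons, ih (prItemStep [] l)]

theorem prItems_append (b c : List (List Char)) :
    prItems (b ++ c) = prItems b ++ prItems c := by
  show (b ++ c).foldl prItemStep [] = prItems b ++ prItems c
  rw [List.foldl_append, prItems_from]
  rfl

-- one step of A equals one step of B, through the abstraction (current, dict) = (prCur secs, prApply d secs)
theorem prStep (d : PySem.Dict String (List String)) (hnd : d.keys.Nodup)
    (hs : d.contains "sources" = true) (ht : d.contains "threads" = true)
    (hc : d.contains "concepts" = true)
    (secs : List (String × List (List Char))) (l : List Char) :
    prStepA (prCur secs, prApply d secs) l = (prCur (prStepS secs l), prApply d (prStepS secs l)) := by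
  have habsorb : ∀ k : String, d.contains k = true →
      prApply d (secs ++ [(k, [])]) = prApply d secs := by
    intro k hk
    rw [prApply_concat]
    have h0 : prItems ([] : List (List Char)) = [] := rfl
    simp only [h0, List.append_nil]
    exact prModify_id _ _ (prNodup_prApply d secs hnd) (prContains_prApply d secs k hk)
  have hcur : ∀ (ss : List (String × List (List Char))) (p : String × List (List Char)),
      prCur (ss ++ [p]) = some p.1 := by
    intro ss p; simp [prCur]
  simp only [prStepA, prStepS, prKeyOf]
  split_ifs with h1 h2 h3 h4 h5
  · simp [hcur, habsorb "sources" hs]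
  · simp [hcur, habsorb "threads" ht]
  · simp [hcur, habsorb "concepts" hc]
  · -- a "- " line whose item is kept
    rcases List.eq_nil_or_concat secs with hnil | ⟨ss, p, hcat⟩
    · subst hnil
      simp [prCur]
    · rw [List.concat_eq_append] at hcat
      subst hcat
      simp only [hcur, List.getLast?_concat, List.dropLast_concat]
      have hone : prItems [PySem.Chars.strip l] =
          [String.ofList (PySem.Chars.strip (PySem.List.slice (PySem.Chars.strip l) (some 2) none))] := by
        show prItemStep [] (PySem.Chars.strip l) = _
        simp only [prItemStep]
        rw [if_pos h4, if_pos h5]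
        rfl
      congr 1
      rw [prApply_concat, prApply_concat, prItems_append, hone, prModify_modify]
      congr 1
      funext v
      rw [List.append_assoc]
  · -- a "- " line whose item is "NONE"
    rcases List.eq_nil_or_concat secs with hnil | ⟨ss, p, hcat⟩
    · subst hnil
      simp [prCur]
    · rw [List.concat_eq_append] at hcat
      subst hcat
      simp only [hcur, List.getLast?_concat, List.dropLast_concat]
      have hnone : prItems [PySem.Chars.strip l] = [] := by
        show prItemStep [] (PySem.Chars.strip l) = _
        simp only [prItemStep]
        rw [if_pos h4, if_neg h5]
      congr 1
      rw [prApply_concat, prApply_concat, prItems_append, hnone, List.append_nil]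
  · -- an ordinary line
    rcases List.eq_nil_or_concat secs with hnil | ⟨ss, p, hcat⟩
    · subst hnil
      simp [prCur]
    · rw [List.concat_eq_append] at hcat
      subst hcat
      simp only [hcur, List.getLast?_concat, List.dropLast_concat]
      have hnone : prItems [PySem.Chars.strip l] = [] := by
        show prItemStep [] (PySem.Chars.strip l) = _
        simp only [prItemStep]
        rw [if_neg h4]
      congr 1
      rw [prApply_concat, prApply_concat, prItems_append, hnone, List.append_nil]

-- the loop invariant: A's scan, started from the state abstracted out of B's sections
theorem prInv (ls : List (List Char)) (d : PySem.Dict String (List String)) (hnd : d.keys.Nodup)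
    (hs : d.contains "sources" = true) (ht : d.contains "threads" = true)
    (hc : d.contains "concepts" = true) (secs : List (String × List (List Char))) :
    (ls.foldl prStepA (prCur secs, prApply d secs)).2 = prApply d (ls.foldl prStepS secs) := by
  induction ls generalizing secs with
  | nil => rfl
  | cons l ls ih =>
      rw [List.foldl_cons, List.foldl_cons, prStep d hnd hs ht hc secs l]
      exact ih (prStepS secs l)

-- ===== VERDICT (by name: the statement is the Claim_ definition above) =====
theorem parse_routing_py_spec : Claim_equal_parse_routing_py := by
  intro response _
  show parse_routing_py response = parse_routing_py_alt response
  unfold parse_routing_py parse_routing_py_alt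
  exact congrArg PySem.Dict.items
    (prInv (PySem.Chars.splitOn response.toList "\n".toList)
      (PySem.Dict.ofList [("sources", []), ("threads", []), ("concepts", [])])
      (by decide) (by decide) (by decide) (by decide) [])
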